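-- pv_equiv track=rewrite | github.com/nikolay-e/treemapper | src/treemapper/diffctx/parsers/markdown.py | _find_all_headings
-- ===== SOURCE A (Python) =====
-- def _find_all_headings(lines: list[str]) -> list[tuple[int, int]]:
--     headings: list[tuple[int, int]] = []
--     for i, line in enumerate(lines):
--         stripped = line.lstrip()
--         if not stripped.startswith("#"):
--             continue
--         level = len(stripped) - len(stripped.lstrip("#"))
--         if level <= 6 and (len(stripped) == level or stripped[level] == " "):
--             headings.append((i + 1, level))
--     return headings
-- ===== SOURCE B (Python) =====
-- def _find_all_headings(lines: list[str]) -> list[tuple[int, int]]: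
--     headings: list[tuple[int, int]] = []
--     for i, line in enumerate(lines):
--         s = line.lstrip()
--         for level in range(6, 0, -1):
--             marker = "#" * level
--             if s == marker or s.startswith(marker + " "):
--                 headings.append((i + 1, level))
--                 break
--     return headings
-- ===== Notes on version B (the rewrite author's own statement) =====
-- stated objective: idiomatic
-- what changed: Instead of counting leading '#' characters arithmetically (len minus len after lstrip('#')) and then checking the threshold and the following character, B matches the stripped line against the six literal markers '#'*level (longest first, breaking on the first hit), so 7+ hashes or a missing space simply fail every marker.
import Mathlib
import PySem

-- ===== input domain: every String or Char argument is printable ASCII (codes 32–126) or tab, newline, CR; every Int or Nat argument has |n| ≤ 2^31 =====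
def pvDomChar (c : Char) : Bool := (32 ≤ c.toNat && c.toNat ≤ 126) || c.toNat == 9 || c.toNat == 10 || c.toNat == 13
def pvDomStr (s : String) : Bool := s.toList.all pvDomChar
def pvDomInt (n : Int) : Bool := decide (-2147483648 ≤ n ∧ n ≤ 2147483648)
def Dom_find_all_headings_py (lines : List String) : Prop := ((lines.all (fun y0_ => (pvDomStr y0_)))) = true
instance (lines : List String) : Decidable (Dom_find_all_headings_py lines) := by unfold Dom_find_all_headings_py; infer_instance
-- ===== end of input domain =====

-- B replaces A's hash-count-then-threshold arithmetic by matching the stripped line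
-- against the six literal markers "#"*level (longest first, break on first hit): idiomatic, same cost.

-- ===== PORT A =====
-- `stripped.lstrip("#")` ported by hand as dropWhile (· == '#'): exact, since the strip set is the single char '#'.
def find_all_headings_py (lines : List String) : List (Int × Int) :=
  (PySem.List.enumerate lines 0).foldl (fun headings p =>
    let i := p.1
    let stripped := PySem.Chars.lstrip p.2.toList
    if PySem.Chars.startswith stripped ['#'] = false then headings
    else
      let level : Nat := stripped.length - (stripped.dropWhile (· == '#')).length
      if level ≤ 6 ∧ (stripped.length = level ∨ PySem.List.pyGet? stripped (level : Int) = some ' ') then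
        headings ++ [(i + 1, (level : Int))]
      else headings) []

-- ===== PORT B =====
-- inner `for level in range(6, 0, -1): … break` ported as findSome? over the same range
def find_all_headings_py_alt (lines : List String) : List (Int × Int) :=
  (PySem.List.enumerate lines 0).foldl (fun headings p =>
    let s := PySem.Chars.lstrip p.2.toList
    match (PySem.List.pyRange 6 0 (-1)).findSome? (fun level =>
        let marker := List.replicate level.toNat '#'
        if s = marker ∨ PySem.Chars.startswith s (marker ++ [' ']) = true then
          some (p.1 + 1, level)
        else none) with
    | some h => headings ++ [h]
    | none => headings) []

-- ===== PRECONDITION & SPEC =====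
def Spec_find_all_headings_py (lines : List String) (out : List (Int × Int)) : Prop := out = find_all_headings_py_alt lines
instance (lines : List String) (out : List (Int × Int)) : Decidable (Spec_find_all_headings_py lines out) := by unfold Spec_find_all_headings_py; infer_instance

-- ===== CLAIM (what is proved, stated in full; the proofs are below) =====
def Claim_equal_find_all_headings_py : Prop := ∀ (lines : List String), Dom_find_all_headings_py lines → Spec_find_all_headings_py lines (find_all_headings_py lines)

-- ===== LEMMAS AND PROOFS =====

lemma singleton_prefix_iff (a : Char) (l : List Char) : [a] <+: l ↔ l.head? = some a := by
  cases l <;> simp [List.cons_prefix_cons, eq_comm]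

lemma head?_rep_app (k : ℕ) (t : List Char) :
    (List.replicate k '#' ++ t).head? = if k = 0 then t.head? else some '#' := by
  cases k <;> simp [List.replicate_succ]

lemma drop_rep (k : ℕ) (t : List Char) (ht : t.head? ≠ some '#') :
    (List.replicate k '#' ++ t).dropWhile (· == '#') = t := by
  induction k with
  | zero => cases t with
    | nil => simp
    | cons a t' =>
        simp only [List.head?_cons, ne_eq, Option.some.injEq] at ht
        simp [ht]
  | succ k ih => simpa [List.replicate_succ, List.dropWhile_cons] using ih

lemma rep_eq (k L : ℕ) (t : List Char) (ht : t.head? ≠ some '#') :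
    (List.replicate k '#' ++ t = List.replicate L '#') ↔ (k = L ∧ t = []) := by
  induction k generalizing L with
  | zero =>
      cases L with
      | zero => simp
      | succ L' =>
          simp only [List.replicate, List.nil_append]
          constructor
          · intro h; subst h; simp at ht
          · rintro ⟨h, -⟩; omega
  | succ k ih =>
      cases L with
      | zero => simp [List.replicate_succ]
      | succ L' => simp [List.replicate_succ, ih L']

lemma rep_prefix (k L : ℕ) (t : List Char) (ht : t.head? ≠ some '#') :
    ((List.replicate L '#' ++ [' ']) <+: (List.replicate k '#' ++ t)) ↔ (k = L ∧ t.head? = some ' ') := by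
  induction L generalizing k with
  | zero =>
      cases k with
      | zero => simp [singleton_prefix_iff]
      | succ k' => simp [List.replicate_succ]
  | succ L ih =>
      cases k with
      | zero =>
          rcases t with _ | ⟨a, t'⟩
          · simp [List.replicate_succ]
          · simp only [List.head?_cons, ne_eq, Option.some.injEq] at ht
            simp only [List.replicate_succ, List.replicate_zero, List.nil_append,
              List.cons_append, List.cons_prefix_cons]
            constructor
            · rintro ⟨h, -⟩; exact absurd h.symm ht
            · rintro ⟨h, -⟩; omega
      | succ k' =>
          simp [List.replicate_succ, List.cons_prefix_cons, ih k' ]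
lemma head?_dropWhile_ne (s : List Char) : (s.dropWhile (· == '#')).head? ≠ some '#' := by
  induction s with
  | nil => simp
  | cons a s ih => by_cases h : a = '#' <;> simp [h, ih]

lemma decomp (s : List Char) : ∃ k t, s = List.replicate k '#' ++ t ∧ t.head? ≠ some '#' := by
  refine ⟨(s.takeWhile (· == '#')).length, s.dropWhile (· == '#'), ?_, head?_dropWhile_ne s⟩
  conv_lhs => rw [← List.takeWhile_append_dropWhile (p := (· == '#')) (l := s)]
  congr 1
  rw [List.eq_replicate_iff]
  exact ⟨rfl, fun b hb => by simpa using List.mem_takeWhile_imp hb⟩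

set_option maxHeartbeats 1000000 in
lemma line_eq (i : Int) (s : List Char) (acc : List (Int × Int)) :
    (if PySem.Chars.startswith s ['#'] = false then acc
     else if (s.length - (s.dropWhile (· == '#')).length) ≤ 6 ∧
          (s.length = s.length - (s.dropWhile (· == '#')).length ∨
           PySem.List.pyGet? s ((s.length - (s.dropWhile (· == '#')).length : ℕ) : Int) = some ' ')
       then acc ++ [(i + 1, ((s.length - (s.dropWhile (· == '#')).length : ℕ) : Int))] else acc)
    = (match (PySem.List.pyRange 6 0 (-1)).findSome? (fun level =>
          if s = List.replicate level.toNat '#' ∨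
             PySem.Chars.startswith s (List.replicate level.toNat '#' ++ [' ']) = true
          then some (i + 1, level) else none) with
       | some h => acc ++ [h] | none => acc) := by
  obtain ⟨k, t, hs, ht⟩ := decomp s
  subst hs
  rw [drop_rep k t ht]
  have hr : PySem.List.pyRange 6 0 (-1) = [6, 5, 4, 3, 2, 1] := by decide
  have hlev : (List.replicate k '#' ++ t).length - t.length = k := by simp
  have hlen : (List.replicate k '#' ++ t).length = k + t.length := by simp
  have hsw : (PySem.Chars.startswith (List.replicate k '#' ++ t) ['#'] = false) ↔ k = 0 := by
    rw [← Bool.not_eq_true, PySem.Chars.startswith_iff, singleton_prefix_iff, head?_rep_app]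
    rcases Nat.eq_zero_or_pos k with h | h
    · simp [h, ht]
    · simp [Nat.pos_iff_ne_zero.mp h]
  have hget : (List.replicate k '#' ++ t)[k]? = t.head? := by
    rw [List.getElem?_append_right (by simp)]
    simp [List.head?_eq_getElem?]
  have h1 : ∀ L : ℕ, (List.replicate k '#' ++ t = List.replicate L '#') ↔ (k = L ∧ t = []) :=
    fun L => rep_eq k L t ht
  have h2 : ∀ L : ℕ, (PySem.Chars.startswith (List.replicate k '#' ++ t)
      (List.replicate L '#' ++ [' ']) = true) ↔ (k = L ∧ t.head? = some ' ') :=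
    fun L => (PySem.Chars.startswith_iff _ _).trans (rep_prefix k L t ht)
  have h3 : (List.replicate k '#' ++ t).length = k ↔ t = [] := by
    simp [List.length_eq_zero_iff]
  rw [hr]
  simp only [hlev, PySem.List.pyGet?_natCast, hget, List.findSome?_cons,
    show ((6:Int)).toNat = 6 from rfl, show ((5:Int)).toNat = 5 from rfl,
    show ((4:Int)).toNat = 4 from rfl, show ((3:Int)).toNat = 3 from rfl,
    show ((2:Int)).toNat = 2 from rfl, show ((1:Int)).toNat = 1 from rfl,
    h1, h2, h3, hsw]
  by_cases hk : k ≤ 6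
  · rcases t with _ | ⟨a, t'⟩
    · interval_cases k <;> simp
    · by_cases ha : a = ' ' <;> interval_cases k <;> simp [ha]
  · have h0 : ¬ k = 0 := by omega
    simp only [if_neg h0]
    split_ifs <;> simp_all <;> omega

-- ===== VERDICT (by name: the statement is the Claim_ definition above) =====
theorem find_all_headings_py_spec : Claim_equal_find_all_headings_py := by
  intro lines _
  unfold Spec_find_all_headings_py find_all_headings_py find_all_headings_py_alt
  congr 1
  funext acc p
  exact line_eq p.1 (PySem.Chars.lstrip p.2.toList) acc
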